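-- pv_equiv track=rewrite | github.com/daniel-reich/ubiquitous-fiesta | 72KukSssxk2eHrWqx_21.py | char_at_pos
-- ===== SOURCE A (Python) =====
-- def char_at_pos(r, s):
--     nl=[]
--     for i in range(-1,-len(r)-1,-1):
--
--
--         if (s=="odd") & (i %2 !=0):
--             nl.append(r[i])
--         elif (s=="even") & (i %2 ==0):
--             nl.append(r[i])
--     if type(r)==str:
--         return ''.join(nl[::-1])
--     else:
--         return nl[::-1]
-- ===== SOURCE B (Python) =====
-- def char_at_pos(r, s):
--     if s == "odd":
--         start = (len(r) + 1) % 2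
--     elif s == "even":
--         start = len(r) % 2
--     else:
--         return '' if type(r) == str else []
--     picked = r[start::2]
--     return ''.join(picked) if type(r) == str else list(picked)
-- ===== Notes on version B (the rewrite author's own statement) =====
-- stated objective: simpler
-- what changed: A scans the string end-to-start over negative indices in a Python loop, filters by index parity and reverses the collected list; B computes the start offset from len(r)'s parity and takes a single forward strided slice r[start::2].
import Mathlib
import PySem

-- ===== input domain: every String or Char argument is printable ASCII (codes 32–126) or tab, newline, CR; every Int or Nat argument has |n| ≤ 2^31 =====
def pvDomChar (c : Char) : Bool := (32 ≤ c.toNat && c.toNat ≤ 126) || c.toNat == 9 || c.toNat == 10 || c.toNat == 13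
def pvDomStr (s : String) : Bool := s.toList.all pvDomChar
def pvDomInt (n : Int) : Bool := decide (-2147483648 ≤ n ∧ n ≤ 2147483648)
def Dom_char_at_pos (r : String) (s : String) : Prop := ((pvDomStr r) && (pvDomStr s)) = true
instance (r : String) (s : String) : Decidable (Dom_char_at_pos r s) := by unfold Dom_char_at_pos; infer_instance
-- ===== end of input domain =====

-- B replaces A's end-to-start scan + parity filter + reversal by one parity offset and a single
-- forward strided slice r[start::2] (objective: simpler).

-- ===== PORT A =====
-- literal transliteration of A: backwards range over negative indices, parity-filtered appends, reversed at the end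
def char_at_pos (r : String) (s : String) : String :=
  let cs := r.toList
  let nl : List Char :=
    (PySem.List.pyRange (-1) (-(cs.length : Int) - 1) (-1)).foldl
      (fun nl i =>
        if (s == "odd") && !(PySem.Int.mod i 2 == 0) then
          nl ++ [PySem.List.pyGetD cs i ' ']          -- r[i]: i is always in range here
        else if (s == "even") && (PySem.Int.mod i 2 == 0) then
          nl ++ [PySem.List.pyGetD cs i ' ']
        else nl) []
  String.ofList ((PySem.List.slice? nl none none (-1)).getD [])   -- nl[::-1]

-- ===== PORT B =====
-- literal transliteration of B: start from len parity, one strided slice r[start::2]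
def char_at_pos_alt (r : String) (s : String) : String :=
  let cs := r.toList
  if s == "odd" then
    let start := PySem.Int.mod ((cs.length : Int) + 1) 2
    String.ofList ((PySem.List.slice? cs (some start) none 2).getD [])
  else if s == "even" then
    let start := PySem.Int.mod (cs.length : Int) 2
    String.ofList ((PySem.List.slice? cs (some start) none 2).getD [])
  else ""

-- ===== PRECONDITION & SPEC =====
def Spec_char_at_pos (r : String) (s : String) (out : String) : Prop := out = char_at_pos_alt r s
instance (r : String) (s : String) (out : String) : Decidable (Spec_char_at_pos r s out) := by unfold Spec_char_at_pos; infer_instance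

-- ===== CLAIM (what is proved, stated in full; the proofs are below) =====
def Claim_equal_char_at_pos : Prop := ∀ (r : String) (s : String), Dom_char_at_pos r s → Spec_char_at_pos r s (char_at_pos r s)

-- ===== LEMMAS AND PROOFS =====

-- the backwards range A iterates over, as a forward map
theorem pyRange_back (n : Nat) :
    PySem.List.pyRange (-1) (-(n : Int) - 1) (-1) = (List.range n).map (fun k : Nat => -1 - (k : Int)) := by
  unfold PySem.List.pyRange
  cases n with
  | zero => simp
  | succ m =>
    simp only [if_neg (by norm_num : ¬ ((-1 : Int) = 0)), if_neg (by norm_num : ¬ (0 < (-1 : Int)))]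
    rw [if_pos (by push_cast; omega)]
    have : ((-1 : Int) - (-(↑(m+1) : Int) - 1) + - -1 - 1) / -(-1) = ((m+1 : Nat) : Int) := by
      push_cast; ring_nf; omega
    rw [this, Int.toNat_natCast]
    exact List.map_congr_left (fun a _ => by ring)

-- B's strided slice, as a forward map (start clamped to the length)
theorem sliceB (cs : List Char) (st : Nat) :
    (PySem.List.slice? cs (some (st : Int)) none 2).getD []
      = (List.range ((cs.length - min st cs.length + 1) / 2)).map
          (fun k => cs.getD (min st cs.length + 2 * k) ' ') := by
  unfold PySem.List.slice? PySem.List.sliceIndices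
  have h2 : ¬ ((2:Int) = 0) := by norm_num
  have h2' : ¬ ((2:Int) < 0) := by norm_num
  have h2'' : (0:Int) < 2 := by norm_num
  simp only [if_neg h2, if_neg h2', if_pos h2'', Option.getD_some]
  have hcl : ¬ ((st : Int) < 0) := by omega
  simp only [if_neg hcl]
  have hmin : min (st : Int) (cs.length : Int) = ((min st cs.length : Nat) : Int) := by omega
  rw [hmin]
  have hcount : (if ((min st cs.length : Nat):Int) < (cs.length:Int) then (((cs.length:Int) - ((min st cs.length : Nat):Int) + 2 - 1) / 2).toNat else 0) = (cs.length - min st cs.length + 1) / 2 := by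
    split_ifs with h <;> omega
  rw [hcount]
  rw [List.filterMap_congr (g := fun k => some (cs.getD (min st cs.length + 2 * k) ' ')) ?_]
  · exact List.filterMap_eq_map.symm ▸ rfl
  · intro k hk
    rw [List.mem_range] at hk
    have hidx : (((min st cs.length : Nat):Int) + 2 * (k:Int)).toNat = min st cs.length + 2 * k := by omega
    rw [hidx]
    have hlt : min st cs.length + 2 * k < cs.length := by omega
    simp [List.getElem?_eq_getElem hlt]

-- even/odd index filters of a range as strided maps
theorem filter_even_range (n : Nat) :
    (List.range n).filter (fun k => k % 2 == 0) = (List.range ((n + 1) / 2)).map (fun j => 2 * j) := by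
  induction n with
  | zero => simp
  | succ m ih =>
    rw [List.range_succ, List.filter_append, ih]
    by_cases h : m % 2 = 0
    · have h2 : (m + 1 + 1) / 2 = (m + 1) / 2 + 1 := by omega
      rw [h2, List.range_succ, List.map_append]
      simp [h]
      omega
    · have h2 : (m + 1 + 1) / 2 = (m + 1) / 2 := by omega
      rw [h2]
      simp [h]

theorem filter_odd_range (n : Nat) :
    (List.range n).filter (fun k => k % 2 == 1) = (List.range (n / 2)).map (fun j => 2 * j + 1) := by
  induction n with
  | zero => simp
  | succ m ih =>
    rw [List.range_succ, List.filter_append, ih]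
    by_cases h : m % 2 = 1
    · have h2 : (m + 1) / 2 = m / 2 + 1 := by omega
      rw [h2, List.range_succ, List.map_append]
      simp [h]
      omega
    · have h2 : (m + 1) / 2 = m / 2 := by omega
      rw [h2]
      simp [h]

-- a fold whose body never changes the accumulator
theorem foldl_id {α β : Type} (l : List α) (acc : β) : l.foldl (fun a _ => a) acc = acc := by
  induction l generalizing acc with
  | nil => rfl
  | cons x xs ih => exact ih acc

-- the odd case, on the character lists
theorem odd_case (cs : List Char) :
    ((PySem.List.pyRange (-1) (-(cs.length : Int) - 1) (-1)).foldl
        (fun nl i => if (!(PySem.Int.mod i 2 == 0)) = true then nl ++ [PySem.List.pyGetD cs i ' '] else nl)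
        []).reverse
      = (PySem.List.slice? cs (some (PySem.Int.mod ((cs.length : Int) + 1) 2)) none 2).getD [] := by
  have hstart : PySem.Int.mod ((cs.length : Int) + 1) 2 = (((cs.length + 1) % 2 : Nat) : Int) := by
    rw [show ((cs.length : Int) + 1) = (((cs.length + 1 : Nat)) : Int) by push_cast; ring]
    exact PySem.Int.mod_natCast (cs.length + 1) 2
  rw [hstart, sliceB, pyRange_back,
      PySem.List.foldl_append_if (fun i => !(PySem.Int.mod i 2 == 0)) (fun i => PySem.List.pyGetD cs i ' ')]
  rw [List.filter_map]
  rw [List.filter_congr (q := fun k : Nat => k % 2 == 0) ?_]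
  · rw [filter_even_range, List.map_map, List.map_map]
    apply List.ext_getElem
    · simp; omega
    · intro j h1 h2
      simp only [List.nil_append, List.length_reverse, List.length_map, List.length_range] at h1 h2 ⊢
      simp only [List.getElem_reverse, List.getElem_map, List.getElem_range,
                 Function.comp_apply, List.length_map, List.length_range]
      have hn : 0 < cs.length := by omega
      have hcast : (-1 : Int) - (2 * ((cs.length + 1) / 2 - 1 - j) : Nat)
          = -(((2 * ((cs.length + 1) / 2 - 1 - j) + 1 : Nat)) : Int) := by push_cast; ring
      rw [hcast, PySem.List.pyGetD_neg_natCast _ _ _ (by omega) (by omega)]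
      rw [List.getD_eq_getElem cs ' ' (by omega)]
      congr 1
      omega
  · intro k hk
    simp only [Function.comp_apply, PySem.Int.mod_eq_emod_of_pos (b := 2) (by norm_num)]
    by_cases h : k % 2 = 0
    · have h1 : (-1 - (k : Int)) % 2 = 1 := by omega
      simp [h, h1]
    · have h1 : (-1 - (k : Int)) % 2 = 0 := by omega
      simp [h, h1]

-- the even case, on the character lists
theorem even_case (cs : List Char) :
    ((PySem.List.pyRange (-1) (-(cs.length : Int) - 1) (-1)).foldl
        (fun nl i => if (PySem.Int.mod i 2 == 0) = true then nl ++ [PySem.List.pyGetD cs i ' '] else nl)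
        []).reverse
      = (PySem.List.slice? cs (some (PySem.Int.mod ((cs.length : Int)) 2)) none 2).getD [] := by
  have hstart : PySem.Int.mod ((cs.length : Int)) 2 = (((cs.length) % 2 : Nat) : Int) :=
    PySem.Int.mod_natCast cs.length 2
  rw [hstart, sliceB, pyRange_back,
      PySem.List.foldl_append_if (fun i => (PySem.Int.mod i 2 == 0)) (fun i => PySem.List.pyGetD cs i ' ')]
  rw [List.filter_map]
  rw [List.filter_congr (q := fun k : Nat => k % 2 == 1) ?_]
  · rw [filter_odd_range, List.map_map, List.map_map]
    apply List.ext_getElem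
    · simp; omega
    · intro j h1 h2
      simp only [List.nil_append, List.length_reverse, List.length_map, List.length_range] at h1 h2 ⊢
      simp only [List.getElem_reverse, List.getElem_map, List.getElem_range,
                 Function.comp_apply, List.length_map, List.length_range]
      have hn : 0 < cs.length := by omega
      have hcast : (-1 : Int) - ((2 * (cs.length / 2 - 1 - j) + 1 : Nat))
          = -(((2 * (cs.length / 2 - 1 - j) + 2 : Nat)) : Int) := by push_cast; ring
      rw [hcast, PySem.List.pyGetD_neg_natCast _ _ _ (by omega) (by omega)]
      rw [List.getD_eq_getElem cs ' ' (by omega)]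
      congr 1
      omega
  · intro k hk
    simp only [Function.comp_apply, PySem.Int.mod_eq_emod_of_pos (b := 2) (by norm_num)]
    by_cases h : k % 2 = 1
    · have h1 : (-1 - (k : Int)) % 2 = 0 := by omega
      simp [h, h1]
    · have h1 : (-1 - (k : Int)) % 2 = 1 := by omega
      simp [h, h1]

-- ===== VERDICT (by name: the statement is the Claim_ definition above) =====
theorem char_at_pos_spec : Claim_equal_char_at_pos := by
  intro r s _
  unfold Spec_char_at_pos char_at_pos char_at_pos_alt
  simp only []
  by_cases ho : s = "odd"
  · subst ho
    simp only [show (("odd" : String) == "odd") = true from rfl,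
               show (("odd" : String) == "even") = false from rfl,
               Bool.true_and, Bool.false_and, Bool.false_eq_true, if_false, if_true]
    rw [PySem.List.slice?_none_none_neg_one, Option.getD_some]
    exact congrArg String.ofList (odd_case r.toList)
  · by_cases he : s = "even"
    · subst he
      simp only [show (("even" : String) == "odd") = false from rfl,
                 show (("even" : String) == "even") = true from rfl,
                 Bool.true_and, Bool.false_and, Bool.false_eq_true, if_false, if_true]
      rw [PySem.List.slice?_none_none_neg_one, Option.getD_some]
      exact congrArg String.ofList (even_case r.toList)
    · have h1 : (s == "odd") = false := by simp [ho]
      have h2 : (s == "even") = false := by simp [he]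
      simp only [h1, h2, Bool.false_and, Bool.false_eq_true, if_false]
      rw [foldl_id, PySem.List.slice?_none_none_neg_one, Option.getD_some]
      rfl
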